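-- pv_equiv track=rewrite | github.com/x4cc3/bbagent | bbagent_ai_payloads.py | sneaky_encode
-- ===== SOURCE A (Python) =====
-- ZERO = '\u2062'
--
-- ONE = '\u2064'
--
-- def sneaky_encode(text):
--     """Encode ASCII text to invisible Sneaky Bits."""
--     result = []
--     for char in text:
--         code = ord(char)
--         if code > 127:
--             # Encode UTF-8 bytes for non-ASCII
--             for byte in char.encode('utf-8'):
--                 bits = format(byte, '08b')
--                 for bit in bits:
--                     result.append(ONE if bit == '1' else ZERO)
--         else:
--             bits = format(code, '08b')
--             for bit in bits:
--                 result.append(ONE if bit == '1' else ZERO)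
--     return ''.join(result)
-- ===== SOURCE B (Python) =====
-- ZERO = '\u2062'
--
-- ONE = '\u2064'
--
-- def sneaky_encode(text):
--     """Encode ASCII text to invisible Sneaky Bits."""
--     chunks = []
--     for byte in text.encode('utf-8'):
--         chunk = ''
--         for _ in range(8):
--             chunk = (ONE if byte & 1 else ZERO) + chunk
--             byte >>= 1
--         chunks.append(chunk)
--     return ''.join(chunks)
-- ===== Notes on version B (the rewrite author's own statement) =====
-- stated objective: alternative
-- what changed: B encodes the text to UTF-8 bytes once (removing A's ASCII/non-ASCII branch) and builds each byte's 8-bit chunk back-to-front by repeated halving (byte & 1, byte >>= 1) with string prepending, instead of A's left-to-right walk over a zero-padded per-byte format() string.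
import Mathlib
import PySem

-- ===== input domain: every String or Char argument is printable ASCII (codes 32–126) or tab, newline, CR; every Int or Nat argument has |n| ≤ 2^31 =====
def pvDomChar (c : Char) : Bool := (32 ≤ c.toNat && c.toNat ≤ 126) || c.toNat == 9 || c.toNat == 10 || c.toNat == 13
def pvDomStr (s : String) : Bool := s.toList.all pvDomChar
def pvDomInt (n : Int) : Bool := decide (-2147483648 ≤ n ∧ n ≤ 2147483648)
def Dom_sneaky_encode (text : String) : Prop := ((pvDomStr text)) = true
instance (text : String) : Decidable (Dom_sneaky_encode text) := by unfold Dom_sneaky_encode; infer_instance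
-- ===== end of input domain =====

-- B encodes to UTF-8 bytes once and builds each byte's bits back-to-front by repeated
-- halving, instead of A's per-char branch and left-to-right format() string walk
-- (objective: alternative).

def pvZERO : Char := '\u2062'
def pvONE : Char := '\u2064'

-- UTF-8 bytes of a code point (exact port of '.encode('utf-8')' for valid scalar values)
def pvUtf8Bytes (n : Nat) : List Nat :=
  if n < 0x80 then [n]
  else if n < 0x800 then [0xC0 ||| (n >>> 6), 0x80 ||| (n &&& 0x3F)]
  else if n < 0x10000 then [0xE0 ||| (n >>> 12), 0x80 ||| ((n >>> 6) &&& 0x3F), 0x80 ||| (n &&& 0x3F)]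
  else [0xF0 ||| (n >>> 18), 0x80 ||| ((n >>> 12) &&& 0x3F), 0x80 ||| ((n >>> 6) &&& 0x3F), 0x80 ||| (n &&& 0x3F)]

-- ===== PORT A =====
-- format(n, '08b'): binary digits, zero-padded on the left to width 8
def pvFormat08b (n : Nat) : List Char :=
  let s := Nat.toDigits 2 n
  List.replicate (8 - s.length) '0' ++ s

def sneaky_encode (text : String) : String :=
  String.mk (text.toList.foldl (fun result char =>
    let code := char.toNat
    if code > 127 then
      result ++ (pvUtf8Bytes code).flatMap (fun byte =>
        (pvFormat08b byte).map (fun bit => if bit = '1' then pvONE else pvZERO))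
    else
      result ++ (pvFormat08b code).map (fun bit => if bit = '1' then pvONE else pvZERO)) [])

-- ===== PORT B =====
-- inner 'for _ in range(8)' loop of Source B: prepend the low bit, then halve, k times
def pvChunk : Nat → Nat → List Char → List Char
  | 0, _, chunk => chunk
  | k + 1, byte, chunk => pvChunk k (byte >>> 1) ((if byte &&& 1 = 1 then pvONE else pvZERO) :: chunk)

def sneaky_encode_alt (text : String) : String :=
  String.mk ((text.toList.flatMap (fun c => pvUtf8Bytes c.toNat)).foldr
    (fun byte acc => pvChunk 8 byte [] ++ acc) [])

-- ===== PRECONDITION & SPEC =====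
def Spec_sneaky_encode (text : String) (out : String) : Prop := out = sneaky_encode_alt text
instance (text : String) (out : String) : Decidable (Spec_sneaky_encode text out) := by unfold Spec_sneaky_encode; infer_instance

-- ===== CLAIM (what is proved, stated in full; the proofs are below) =====
def Claim_equal_sneaky_encode : Prop := ∀ (text : String), Dom_sneaky_encode text → Spec_sneaky_encode text (sneaky_encode text)

-- ===== LEMMAS AND PROOFS =====

def pvBitsA (n : Nat) : List Char :=
  (pvFormat08b n).map (fun bit => if bit = '1' then pvONE else pvZERO)

-- the two per-byte bit expansions agree on every byte value below 128 (the only ones Dom admits)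
theorem pvBits_eq (n : Nat) (h : n < 128) : pvBitsA n = pvChunk 8 n [] := by
  have hall : (List.range 128).all (fun m => pvBitsA m == pvChunk 8 m []) = true := by decide
  have hmem : n ∈ List.range 128 := List.mem_range.mpr h
  exact eq_of_beq (List.all_eq_true.mp hall n hmem)

theorem pvLoop (l : List Char) (h : ∀ c ∈ l, pvDomChar c = true) (acc : List Char) :
    l.foldl (fun result char =>
      let code := char.toNat
      if code > 127 then
        result ++ (pvUtf8Bytes code).flatMap (fun byte =>
          (pvFormat08b byte).map (fun bit => if bit = '1' then pvONE else pvZERO))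
      else
        result ++ (pvFormat08b code).map (fun bit => if bit = '1' then pvONE else pvZERO)) acc
    = acc ++ l.flatMap (fun c => pvChunk 8 c.toNat []) := by
  induction l generalizing acc with
  | nil => simp
  | cons c cs ih =>
      have hc := h c List.mem_cons_self
      have hlt : c.toNat < 128 := by simp [pvDomChar] at hc; omega
      have hb : (pvFormat08b c.toNat).map (fun bit => if bit = '1' then pvONE else pvZERO)
          = pvChunk 8 c.toNat [] := pvBits_eq _ hlt
      simp only [List.foldl_cons, List.flatMap_cons]
      rw [ih (fun x hx => h x (List.mem_cons_of_mem _ hx))]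
      simp only [if_neg (show ¬ c.toNat > 127 by omega), hb, List.append_assoc]

-- each ASCII char's utf-8 encoding is the single byte equal to its code
theorem pvUtf8_ascii (c : Char) (h : pvDomChar c = true) : pvUtf8Bytes c.toNat = [c.toNat] := by
  have hlt : c.toNat < 128 := by simp [pvDomChar] at h; omega
  unfold pvUtf8Bytes
  rw [if_pos hlt]

-- B's byte-level foldr over the utf-8 stream equals the per-char flatMap of chunks on ASCII input
theorem pvFlat (l : List Char) (h : ∀ c ∈ l, pvDomChar c = true) :
    (l.flatMap (fun c => pvUtf8Bytes c.toNat)).foldr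
      (fun byte acc => pvChunk 8 byte [] ++ acc) []
    = l.flatMap (fun c => pvChunk 8 c.toNat []) := by
  induction l with
  | nil => rfl
  | cons c cs ih =>
      have hc := h c List.mem_cons_self
      simp only [List.flatMap_cons]
      rw [pvUtf8_ascii c hc]
      simp only [List.cons_append, List.nil_append, List.foldr_cons]
      rw [ih (fun x hx => h x (List.mem_cons_of_mem _ hx))]

theorem sneaky_encode_spec : Claim_equal_sneaky_encode := by
  intro text hdom
  unfold Spec_sneaky_encode sneaky_encode sneaky_encode_alt
  unfold Dom_sneaky_encode pvDomStr at hdom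
  have hall := List.all_eq_true.mp hdom
  rw [pvLoop text.toList hall, List.nil_append, pvFlat text.toList hall]
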